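-- pv_equiv track=rewrite | github.com/SanithSamaraweera2002/Trek_Seeker_Web_Application_ML | app/trip_itinerary_gen.py | create_itinerary
-- ===== SOURCE A (Python) =====
-- def create_itinerary(destinations, time_spent, trip_duration=600):
--     itinerary = []
--     total_time = 0
--     for destination, travel_time in sorted(destinations.items(), key=lambda x: x[1]):
--         if destination not in time_spent:
--             continue
--         visit_time = time_spent[destination]
--         if total_time + travel_time + visit_time > trip_duration:
--             break
--         itinerary.append((destination, travel_time, visit_time))
--         total_time += travel_time + visit_time
--
--     return itinerary
-- ===== SOURCE B (Python) =====
-- def create_itinerary(destinations, time_spent, trip_duration=600):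
--     # Selection-based greedy: instead of sorting up front, repeatedly extract the
--     # remaining destination with minimal travel time (first one on ties) and try it.
--     pool = list(destinations.items())
--     itinerary = []
--     total = 0
--     while pool:
--         best = 0
--         for i in range(1, len(pool)):
--             if pool[i][1] < pool[best][1]:
--                 best = i
--         d, t = pool.pop(best)
--         if d not in time_spent:
--             continue
--         v = time_spent[d]
--         if total + t + v > trip_duration:
--             break
--         itinerary.append((d, t, v))
--         total += t + v
--     return itinerary
-- ===== Notes on version B (the rewrite author's own statement) =====
-- stated objective: alternative
-- what changed: Replaces A's sort-then-scan (sorted() once, then one accumulate-and-break pass) by selection-based extraction: B never sorts, it repeatedly scans the remaining pool for the destination with minimal travel time, pops it, and greedily tries it until the budget overflows.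
import Mathlib
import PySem

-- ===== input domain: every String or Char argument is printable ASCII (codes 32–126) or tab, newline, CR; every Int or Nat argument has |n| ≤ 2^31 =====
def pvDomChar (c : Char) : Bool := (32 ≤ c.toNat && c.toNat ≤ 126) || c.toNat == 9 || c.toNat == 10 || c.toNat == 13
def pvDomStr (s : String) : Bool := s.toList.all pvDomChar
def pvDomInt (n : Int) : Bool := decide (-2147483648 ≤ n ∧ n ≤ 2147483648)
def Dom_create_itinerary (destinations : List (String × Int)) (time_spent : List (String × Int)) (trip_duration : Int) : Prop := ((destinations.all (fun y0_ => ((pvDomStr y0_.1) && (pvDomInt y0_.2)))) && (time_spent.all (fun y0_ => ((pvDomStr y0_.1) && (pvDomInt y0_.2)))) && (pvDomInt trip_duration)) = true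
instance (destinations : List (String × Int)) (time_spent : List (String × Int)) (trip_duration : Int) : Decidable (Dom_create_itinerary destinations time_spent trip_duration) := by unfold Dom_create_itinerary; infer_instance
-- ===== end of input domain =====

-- B replaces A's sort-then-scan by selection: it never sorts, it repeatedly pops the
-- destination with minimal travel time from the pool (objective: alternative, same result).

-- ===== PORT A =====
-- the for-loop of A: state = total_time; 'break' returns, 'continue' recurses unchanged
def aLoop (ts : PySem.Dict String Int) (dur : Int) : List (String × Int) → Int → List (String × Int × Int)
  | [], _ => []
  | (d, t) :: rest, total =>
    match ts.get? d with
    | none => aLoop ts dur rest total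
    | some v =>
      if total + t + v > dur then []
      else (d, t, v) :: aLoop ts dur rest (total + t + v)

def create_itinerary (destinations : List (String × Int)) (time_spent : List (String × Int)) (trip_duration : Int) : List (String × Int × Int) :=
  aLoop (PySem.Dict.mk time_spent) trip_duration
    (PySem.List.sorted destinations (fun x => x.2)) 0

-- ===== PORT B =====
-- B's inner 'for i in range(1, len(pool))' scan for the index of the first minimal travel time
def bBest (pool : List (String × Int)) : Int :=
  (PySem.List.pyRange 1 (PySem.List.len pool) 1).foldl
    (fun best i =>
      if (PySem.List.pyGetD pool i ("", 0)).2 < (PySem.List.pyGetD pool best ("", 0)).2 then i else best) 0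

-- B's 'while pool:' loop; state = (pool, itinerary, total); pool.pop(best) = PySem.List.pop?
def bLoop (ts : PySem.Dict String Int) (dur : Int) (pool : List (String × Int))
    (itin : List (String × Int × Int)) (total : Int) : List (String × Int × Int) :=
  if pool = [] then itin
  else
    match hp : PySem.List.pop? pool (bBest pool) with
    | none => itin  -- unreachable: pop of an in-range index never raises
    | some ((d, t), rest) =>
      match ts.get? d with
      | none => bLoop ts dur rest itin total
      | some v =>
        if total + t + v > dur then itin
        else bLoop ts dur rest (itin ++ [(d, t, v)]) (total + t + v)
termination_by pool.length
decreasing_by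
  all_goals
    have h := PySem.List.length_of_pop?_eq_some pool hp
    simp only [] at h
    omega

def create_itinerary_alt (destinations : List (String × Int)) (time_spent : List (String × Int)) (trip_duration : Int) : List (String × Int × Int) :=
  bLoop (PySem.Dict.mk time_spent) trip_duration destinations [] 0

-- ===== PRECONDITION & SPEC =====
def Spec_create_itinerary (destinations : List (String × Int)) (time_spent : List (String × Int)) (trip_duration : Int) (out : List (String × Int × Int)) : Prop := out = create_itinerary_alt destinations time_spent trip_duration
instance (destinations : List (String × Int)) (time_spent : List (String × Int)) (trip_duration : Int) (out : List (String × Int × Int)) : Decidable (Spec_create_itinerary destinations time_spent trip_duration out) := by unfold Spec_create_itinerary; infer_instance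

-- ===== CLAIM (what is proved, stated in full; the proofs are below) =====
def Claim_equal_create_itinerary : Prop := ∀ (destinations : List (String × Int)) (time_spent : List (String × Int)) (trip_duration : Int), Dom_create_itinerary destinations time_spent trip_duration → Spec_create_itinerary destinations time_spent trip_duration (create_itinerary destinations time_spent trip_duration)

-- ===== LEMMAS AND PROOFS =====

-- the comparison sorted uses (reverse = false)
def pvBefore (a b : String × Int) : Bool := decide (a.2 < b.2)

theorem sorted_snoc (l : List (String × Int)) (x : String × Int) :
    PySem.List.sorted (l ++ [x]) (fun p => p.2) false =
      PySem.List.insertBy pvBefore x (PySem.List.sorted l (fun p => p.2) false) := by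
  rw [PySem.List.sorted_eq_foldl_insertBy, PySem.List.sorted_eq_foldl_insertBy, List.foldl_append]
  rfl

theorem insertBy_cons_not (x y : String × Int) (ys : List (String × Int)) (h : ¬ x.2 < y.2) :
    PySem.List.insertBy pvBefore x (y :: ys) = y :: PySem.List.insertBy pvBefore x ys := by
  simp [PySem.List.insertBy, pvBefore, h]

theorem insertBy_all_gt (x : String × Int) (ys : List (String × Int))
    (h : ∀ y ∈ ys, x.2 < y.2) :
    PySem.List.insertBy pvBefore x ys = x :: ys := by
  cases ys with
  | nil => rfl
  | cons y ys => simp [PySem.List.insertBy, pvBefore, h y (by simp)]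

-- splitting the stable sort at a first minimum: strictly larger before, weakly larger after
theorem sorted_split (m : String × Int) :
    ∀ (post pre : List (String × Int)),
      (∀ x ∈ pre, m.2 < x.2) → (∀ x ∈ post, m.2 ≤ x.2) →
      PySem.List.sorted (pre ++ m :: post) (fun p => p.2) false =
        m :: PySem.List.sorted (pre ++ post) (fun p => p.2) false := by
  intro post
  induction post using List.reverseRecOn with
  | nil =>
    intro pre hpre _
    rw [show pre ++ [m] = pre ++ m :: ([] : List (String × Int)) from rfl] at *
    have : pre ++ m :: ([] : List (String × Int)) = pre ++ [m] := rfl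
    rw [this, sorted_snoc]
    simp only [List.append_nil]
    exact insertBy_all_gt m _ (fun y hy => hpre y ((PySem.List.mem_sorted _ _ _ _).mp hy))
  | append_singleton post' x ih =>
    intro pre hpre hpost
    have hx : m.2 ≤ x.2 := hpost x (by simp)
    have h1 : pre ++ m :: (post' ++ [x]) = (pre ++ m :: post') ++ [x] := by simp
    have h2 : pre ++ (post' ++ [x]) = (pre ++ post') ++ [x] := by simp
    rw [h1, h2, sorted_snoc, sorted_snoc,
      ih pre hpre (fun y hy => hpost y (by simp [hy])),
      insertBy_cons_not x m _ (by omega)]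

-- invariant of B's best-index scan
theorem bestInv (pool : List (String × Int)) :
    ∀ (k : Nat) (j best : Int), (PySem.List.len pool - j).toNat = k →
      0 ≤ best → best < j → j ≤ PySem.List.len pool →
      (∀ i : Int, 0 ≤ i → i < best →
        (PySem.List.pyGetD pool best ("", 0)).2 < (PySem.List.pyGetD pool i ("", 0)).2) →
      (∀ i : Int, 0 ≤ i → i < j →
        (PySem.List.pyGetD pool best ("", 0)).2 ≤ (PySem.List.pyGetD pool i ("", 0)).2) →
      (let r := (PySem.List.pyRange j (PySem.List.len pool) 1).foldl
        (fun best i =>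
          if (PySem.List.pyGetD pool i ("", 0)).2 < (PySem.List.pyGetD pool best ("", 0)).2 then i else best) best
       0 ≤ r ∧ r < PySem.List.len pool ∧
       (∀ i : Int, 0 ≤ i → i < r →
         (PySem.List.pyGetD pool r ("", 0)).2 < (PySem.List.pyGetD pool i ("", 0)).2) ∧
       (∀ i : Int, 0 ≤ i → i < PySem.List.len pool →
         (PySem.List.pyGetD pool r ("", 0)).2 ≤ (PySem.List.pyGetD pool i ("", 0)).2)) := by
  intro k
  induction k with
  | zero =>
    intro j best hk h0 hbj hjn hstrict hle
    have hj : j = PySem.List.len pool := by omega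
    subst hj
    rw [PySem.List.pyRange_one_eq_nil (by omega)]
    simp only [List.foldl_nil]
    exact ⟨h0, by omega, hstrict, hle⟩
  | succ k ih =>
    intro j best hk h0 hbj hjn hstrict hle
    have hjlt : j < PySem.List.len pool := by omega
    rw [PySem.List.pyRange_one_cons hjlt, List.foldl_cons]
    by_cases hc : (PySem.List.pyGetD pool j ("", 0)).2 < (PySem.List.pyGetD pool best ("", 0)).2
    · simp only [hc, if_pos]
      exact ih (j + 1) j (by omega) (by omega) (by omega) (by omega)
        (fun i h0i hij => lt_of_lt_of_le hc (hle i h0i hij))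
        (fun i h0i hij => by
          by_cases hij' : i < j
          · exact le_of_lt (lt_of_lt_of_le hc (hle i h0i hij'))
          · have : i = j := by omega
            subst this; exact le_refl _)
    · simp only [hc, if_false]
      exact ih (j + 1) best (by omega) h0 (by omega) (by omega) hstrict
        (fun i h0i hij => by
          by_cases hij' : i < j
          · exact hle i h0i hij'
          · have : i = j := by omega
            subst this; omega)

-- the three facts about bBest on a nonempty pool
theorem bBest_spec (pool : List (String × Int)) (hne : pool ≠ []) :
    0 ≤ bBest pool ∧ bBest pool < PySem.List.len pool ∧
    (∀ i : Int, 0 ≤ i → i < bBest pool →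
      (PySem.List.pyGetD pool (bBest pool) ("", 0)).2 < (PySem.List.pyGetD pool i ("", 0)).2) ∧
    (∀ i : Int, 0 ≤ i → i < PySem.List.len pool →
      (PySem.List.pyGetD pool (bBest pool) ("", 0)).2 ≤ (PySem.List.pyGetD pool i ("", 0)).2) := by
  have hlen : 1 ≤ PySem.List.len pool := by
    rw [PySem.List.len_eq]
    have := List.length_pos_iff.mpr hne
    omega
  have := bestInv pool (PySem.List.len pool - 1).toNat 1 0 (by omega) (by omega) (by omega) hlen
    (fun i h0i hib => by omega)
    (fun i h0i hib => by
      have : i = 0 := by omega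
      subst this; exact le_refl _)
  exact this

-- membership in take/drop gives the index comparisons needed by sorted_split
theorem mem_take_lt (pool : List (String × Int)) (b : Nat) (x : String × Int)
    (hx : x ∈ pool.take b) : ∃ i : Nat, i < b ∧ i < pool.length ∧ pool[i]? = some x := by
  obtain ⟨i, hi, hget⟩ := List.mem_iff_getElem.mp hx
  have hmin : i < min b pool.length := by
    have h := hi
    simp only [List.length_take] at h
    omega
  simp only [List.getElem_take] at hget
  refine ⟨i, by omega, by omega, ?_⟩
  rw [List.getElem?_eq_getElem (by omega), hget]

theorem pyGetD_eq_of_getElem? (pool : List (String × Int)) (i : Nat) (x : String × Int)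
    (h : pool[i]? = some x) : PySem.List.pyGetD pool (i : Int) ("", 0) = x := by
  rw [PySem.List.pyGetD_natCast]
  simp [List.getD_eq_getElem?_getD, h]

-- B's loop equals A's loop on the stably sorted pool
theorem bLoop_eq (ts : PySem.Dict String Int) (dur : Int) :
    ∀ (pool : List (String × Int)) (itin : List (String × Int × Int)) (total : Int),
      bLoop ts dur pool itin total =
        itin ++ aLoop ts dur (PySem.List.sorted pool (fun p => p.2) false) total := by
  have main : ∀ (n : Nat) (pool : List (String × Int)), pool.length ≤ n →
      ∀ (itin : List (String × Int × Int)) (total : Int),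
      bLoop ts dur pool itin total =
        itin ++ aLoop ts dur (PySem.List.sorted pool (fun p => p.2) false) total := by
    intro n
    induction n with
    | zero =>
      intro pool hlen itin total
      have : pool = [] := List.eq_nil_of_length_eq_zero (by omega)
      subst this
      rw [bLoop]
      simp [aLoop, PySem.List.sorted]
    | succ n ih' =>
      intro pool hlen itin total
      have ih : ∀ (q : List (String × Int)), q.length < pool.length →
          ∀ (itin : List (String × Int × Int)) (total : Int),
          bLoop ts dur q itin total =
            itin ++ aLoop ts dur (PySem.List.sorted q (fun p => p.2) false) total :=
        fun q hq => ih' q (by omega)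
      by_cases hne : pool = []
      · subst hne
        rw [bLoop]
        simp [aLoop, PySem.List.sorted]
      · obtain ⟨h0, hlt, hstrict, hle⟩ := bBest_spec pool hne
        set b := bBest pool with hb
        have hbn : b = ((b.toNat : Nat) : Int) := by omega
        have hblen : b.toNat < pool.length := by
          rw [PySem.List.len_eq] at hlt; omega
        -- pop? returns the element at b and the pool without it
        have hpop : PySem.List.pop? pool b = some (pool[b.toNat], pool.eraseIdx b.toNat) := by
          have h := PySem.List.pop?_natCast (h := hblen)
          rwa [← hbn] at h
        set m := pool[b.toNat] with hm
        have hmget : PySem.List.pyGetD pool b ("", 0) = m := by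
          have h := pyGetD_eq_of_getElem? pool b.toNat m (by simp [hm, hblen])
          rwa [← hbn] at h
        -- decompose pool around index b
        have hsplitpool : pool = pool.take b.toNat ++ m :: pool.drop (b.toNat + 1) := by
          conv_lhs => rw [← List.take_append_drop b.toNat pool]
          rw [List.drop_eq_getElem_cons hblen]
        have herase : pool.eraseIdx b.toNat = pool.take b.toNat ++ pool.drop (b.toNat + 1) :=
          List.eraseIdx_eq_take_drop_succ pool b.toNat
        -- pre elements are strictly larger, post elements weakly larger
        have hpre : ∀ x ∈ pool.take b.toNat, m.2 < x.2 := by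
          intro x hx
          obtain ⟨i, hib, hilen, hget⟩ := mem_take_lt pool b.toNat x hx
          have := hstrict (i : Int) (by omega) (by omega)
          rwa [hmget, pyGetD_eq_of_getElem? pool i x hget] at this
        have hpost : ∀ x ∈ pool.drop (b.toNat + 1), m.2 ≤ x.2 := by
          intro x hx
          obtain ⟨i, hi, hget⟩ := List.mem_iff_getElem.mp hx
          have hilen : b.toNat + 1 + i < pool.length := by
            simp only [List.length_drop] at hi; omega
          have hget' : pool[b.toNat + 1 + i]? = some x := by
            rw [List.getElem?_eq_getElem hilen, ← hget, List.getElem_drop]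
          have := hle ((b.toNat + 1 + i : Nat) : Int) (by omega)
            (by rw [PySem.List.len_eq]; exact_mod_cast hilen)
          rwa [hmget, pyGetD_eq_of_getElem? pool (b.toNat + 1 + i) x hget'] at this
        have hsorted : PySem.List.sorted pool (fun p => p.2) false =
            m :: PySem.List.sorted (pool.eraseIdx b.toNat) (fun p => p.2) false := by
          conv_lhs => rw [hsplitpool]
          rw [herase]
          exact sorted_split m _ _ hpre hpost
        -- unfold one step of bLoop and resolve the pop
        rw [bLoop, if_neg hne, hsorted]
        split
        · -- pop? = none: impossible, the best index is in range
          rename_i hp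
          rw [← hb, hpop] at hp
          exact absurd hp (by simp)
        · rename_i d' t' rest' hp
          rw [← hb, hpop] at hp
          obtain ⟨d, t⟩ := m
          simp only [Option.some.injEq, Prod.mk.injEq] at hp
          obtain ⟨⟨hd, ht⟩, hrest⟩ := hp
          subst hd ht hrest
          cases hget : ts.get? d with
          | none =>
            simp only [hget, aLoop]
            exact ih (pool.eraseIdx b.toNat)
              (by have := List.length_eraseIdx_of_lt hblen; omega) itin total
          | some v =>
            by_cases hlt' : total + t + v > dur
            · simp [hget, aLoop, hlt']
            · simp only [hget, aLoop, if_neg (by omega : ¬ total + t + v > dur)]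
              rw [ih (pool.eraseIdx b.toNat)
                (by have := List.length_eraseIdx_of_lt hblen; omega)
                (itin ++ [(d, t, v)]) (total + t + v)]
              simp
  intro pool itin total
  exact main pool.length pool (le_refl _) itin total

-- ===== VERDICT (by name: the statement is the Claim_ definition above) =====
theorem create_itinerary_spec : Claim_equal_create_itinerary := by
  intro destinations time_spent trip_duration _
  unfold Spec_create_itinerary create_itinerary create_itinerary_alt
  rw [bLoop_eq]
  simp
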